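-- pv_equiv track=rewrite | github.com/Nospoko/midi-hf-transformers | data/maskedmidiencoder.py | replace_masks
-- ===== SOURCE A (Python) =====
-- def replace_masks(token_ids: list[int], mask_id):
--     """
--     Replace every sequence of <MASK> token with one of <SENTINEL_[idx]>.
--     Sentinel tokens do not repeat inside one sequence.
--     """
--     new_list = []
--     current_sequence = []  # Store the current sequence of masks
--     sentinel_token = 0
--     for idx in token_ids:
--         if idx == mask_id:
--             current_sequence.append(idx)
--         else:
--             if current_sequence:
--                 new_list.append(sentinel_token)
--                 sentinel_token += 1
--                 current_sequence = []
--             new_list.append(idx)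
--
--     # Check if the last sequence was <MASK>s
--     if current_sequence:
--         new_list.append(sentinel_token)
--     return new_list
-- ===== SOURCE B (Python) =====
-- from itertools import count
--
--
-- def replace_masks(token_ids: list[int], mask_id):
--     # Stage 1: collapse every maximal run of masks to a single mask token,
--     # by keeping a mask only if it is not preceded by another mask.
--     collapsed = [t for i, t in enumerate(token_ids)
--                  if t != mask_id or i == 0 or token_ids[i - 1] != mask_id]
--     # Stage 2: replace the surviving masks by successive sentinel numbers.
--     sentinel = count()
--     return [next(sentinel) if t == mask_id else t for t in collapsed]
-- ===== Notes on version B (the rewrite author's own statement) =====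
-- stated objective: alternative
-- what changed: Replaces A's single-pass run-buffer state machine by two staged passes: an index-based comprehension that collapses each mask run to one representative (keep a mask only if its predecessor is not a mask), then a numbering pass that maps the surviving masks to successive sentinel ids.
import Mathlib
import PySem

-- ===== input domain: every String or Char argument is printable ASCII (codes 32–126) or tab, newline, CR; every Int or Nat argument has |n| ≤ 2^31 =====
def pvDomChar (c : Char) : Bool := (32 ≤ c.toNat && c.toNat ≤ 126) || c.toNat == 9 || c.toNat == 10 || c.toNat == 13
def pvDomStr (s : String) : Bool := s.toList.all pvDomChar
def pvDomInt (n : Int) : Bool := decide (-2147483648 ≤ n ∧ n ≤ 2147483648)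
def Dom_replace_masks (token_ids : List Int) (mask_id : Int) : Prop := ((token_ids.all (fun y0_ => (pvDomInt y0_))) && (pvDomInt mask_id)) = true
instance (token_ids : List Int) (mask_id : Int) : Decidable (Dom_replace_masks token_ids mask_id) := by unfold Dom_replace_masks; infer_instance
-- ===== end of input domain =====

-- B replaces A's run-buffer state machine by two staged passes: collapse each mask run to one token, then number the survivors (alternative decomposition).


-- ===== PORT A =====
-- state: (new_list, current_sequence, sentinel_token)
def replace_masks (token_ids : List Int) (mask_id : Int) : List Int :=
  let s := token_ids.foldl
    (fun (st : List Int × List Int × Int) idx =>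
      let (new_list, current_sequence, sentinel_token) := st
      if idx = mask_id then
        (new_list, current_sequence ++ [idx], sentinel_token)
      else
        if current_sequence ≠ [] then
          (new_list ++ [sentinel_token] ++ [idx], [], sentinel_token + 1)
        else
          (new_list ++ [idx], current_sequence, sentinel_token))
    ([], [], 0)
  if s.2.1 ≠ [] then s.1 ++ [s.2.2] else s.1

-- ===== PORT B =====
-- stage 1: keep token (i, t) unless it is a mask preceded by a mask (token_ids[i-1] exact via pyGet?)
def rmCollapsed (token_ids : List Int) (mask_id : Int) : List Int :=
  ((PySem.List.enumerate token_ids).filter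
    (fun p => !(p.2 == mask_id) || (p.1 == 0)
              || !(PySem.List.pyGet? token_ids (p.1 - 1) == some mask_id))).map Prod.snd

-- stage 2: itertools.count numbering of the surviving masks, as a fold carrying (out, next sentinel)
def replace_masks_alt (token_ids : List Int) (mask_id : Int) : List Int :=
  ((rmCollapsed token_ids mask_id).foldl
    (fun (st : List Int × Int) t =>
      if t = mask_id then (st.1 ++ [st.2], st.2 + 1) else (st.1 ++ [t], st.2))
    ([], 0)).1

-- ===== PRECONDITION & SPEC =====
def Spec_replace_masks (token_ids : List Int) (mask_id : Int) (out : List Int) : Prop := out = replace_masks_alt token_ids mask_id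
instance (token_ids : List Int) (mask_id : Int) (out : List Int) : Decidable (Spec_replace_masks token_ids mask_id out) := by unfold Spec_replace_masks; infer_instance

-- ===== CLAIM (what is proved, stated in full; the proofs are below) =====
def Claim_equal_replace_masks : Prop := ∀ (token_ids : List Int) (mask_id : Int), Dom_replace_masks token_ids mask_id → Spec_replace_masks token_ids mask_id (replace_masks token_ids mask_id)

-- ===== LEMMAS AND PROOFS =====

-- shared specification: one number per maximal mask run
def pvGroups (mask_id : Int) (xs : List Int) (c : Int) : List Int :=
  match xs with
  | [] => []
  | x :: rest =>
    if x = mask_id then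
      c :: pvGroups mask_id (rest.dropWhile (fun t => t = mask_id)) (c + 1)
    else
      x :: pvGroups mask_id rest c
termination_by xs.length
decreasing_by
  · exact Nat.lt_succ_of_le (List.length_dropWhile_le _ _)
  · simp

-- A side
def pvAStep (mask_id : Int) : List Int × List Int × Int → Int → List Int × List Int × Int :=
  fun st idx =>
    let (new_list, current_sequence, sentinel_token) := st
    if idx = mask_id then
      (new_list, current_sequence ++ [idx], sentinel_token)
    else
      if current_sequence ≠ [] then
        (new_list ++ [sentinel_token] ++ [idx], [], sentinel_token + 1)
      else
        (new_list ++ [idx], current_sequence, sentinel_token)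

def pvFinish (s : List Int × List Int × Int) : List Int :=
  if s.2.1 ≠ [] then s.1 ++ [s.2.2] else s.1

theorem pvA_eq (token_ids : List Int) (mask_id : Int) :
    replace_masks token_ids mask_id =
      pvFinish (token_ids.foldl (pvAStep mask_id) ([], [], 0)) := rfl

theorem pvGroups_mask_cons (rest : List Int) (mask_id c : Int) :
    pvGroups mask_id (mask_id :: rest) c =
      c :: pvGroups mask_id (rest.dropWhile (fun t => t = mask_id)) (c + 1) := by
  rw [pvGroups]; simp

theorem pvGroups_other_cons (x : Int) (rest : List Int) (mask_id c : Int) (hx : ¬ x = mask_id) :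
    pvGroups mask_id (x :: rest) c = x :: pvGroups mask_id rest c := by
  rw [pvGroups]; simp [hx]

theorem pvLoop_inv (xs : List Int) (mask_id : Int) :
    ∀ (acc cur : List Int) (s : Int),
      pvFinish (xs.foldl (pvAStep mask_id) (acc, cur, s)) =
        acc ++ (if cur = [] then pvGroups mask_id xs s
                else pvGroups mask_id (mask_id :: xs) s) := by
  induction xs with
  | nil =>
    intro acc cur s
    by_cases h : cur = [] <;>
      simp [h, pvFinish, pvGroups_mask_cons, pvGroups]
  | cons x rest ih =>
    intro acc cur s
    by_cases hx : x = mask_id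
    · by_cases h : cur = []
      · simp only [List.foldl_cons, pvAStep, if_pos hx, h]
        rw [ih acc ([] ++ [x]) s]
        subst hx
        simp
      · simp only [List.foldl_cons, pvAStep, if_pos hx]
        rw [ih acc (cur ++ [x]) s]
        subst hx
        simp only [List.append_eq_nil_iff, h, false_and, if_false]
        rw [pvGroups_mask_cons, pvGroups_mask_cons]
        simp [List.dropWhile]
    · by_cases h : cur = []
      · simp only [List.foldl_cons, pvAStep, if_neg hx, h,
          if_neg (by simp : ¬([] : List Int) ≠ [])]
        rw [ih (acc ++ [x]) [] s]
        simp [pvGroups_other_cons x rest mask_id s hx]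
      · simp only [List.foldl_cons, pvAStep, if_neg hx, if_pos (by simpa using h : cur ≠ [])]
        rw [ih (acc ++ [s] ++ [x]) [] (s + 1)]
        simp [h, pvGroups_mask_cons, List.dropWhile, hx, pvGroups_other_cons _ _ _ _ hx]

-- B side: recursive characterisation of stage 1
def pvColA (mask_id prev : Int) : List Int → List Int
  | [] => []
  | y :: r => if y = mask_id ∧ prev = mask_id then pvColA mask_id y r else y :: pvColA mask_id y r

def pvCol (mask_id : Int) : List Int → List Int
  | [] => []
  | x :: rest => x :: pvColA mask_id x rest

theorem pvColA_enum (mask_id : Int) (full : List Int) (ys : List Int) :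
    ∀ (k : Nat) (prev : Int), 1 ≤ k → ys = full.drop k → full[k-1]? = some prev →
    ((PySem.List.enumerate ys (k : Int)).filter
      (fun p => !(p.2 == mask_id) || (p.1 == 0)
                || !(PySem.List.pyGet? full (p.1 - 1) == some mask_id))).map Prod.snd
      = pvColA mask_id prev ys := by
  induction ys with
  | nil => intro k prev _ _ _; simp [PySem.List.enumerate_nil, pvColA]
  | cons y r ih =>
    intro k prev hk hys hprev
    have hget : PySem.List.pyGet? full ((k : Int) - 1) = some prev := by
      have hcast : (k : Int) - 1 = ((k - 1 : Nat) : Int) := by omega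
      rw [hcast, PySem.List.pyGet?_natCast]; exact hprev
    have hklt : k < full.length := by
      by_contra h
      have hnil : full.drop k = [] := List.drop_eq_nil_of_le (by omega)
      rw [hnil] at hys
      exact List.cons_ne_nil _ _ hys
    have hfullk : full[k]? = some y := by
      have h0 : (full.drop k)[0]? = full[k + 0]? := List.getElem?_drop
      rw [← hys] at h0
      simpa using h0.symm
    have hr : r = full.drop (k + 1) := by
      have ht : (full.drop k).tail = full.drop (k + 1) := by rw [List.tail_drop]
      rw [← hys] at ht
      simpa using ht
    have hrec := ih (k + 1) y (by omega) hr (by simpa using hfullk)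
    rw [PySem.List.enumerate_cons,
        show (k : Int) + 1 = ((k + 1 : Nat) : Int) by push_cast; ring]
    by_cases hy : y = mask_id
    · by_cases hp : prev = mask_id
      · rw [List.filter_cons_of_neg
            (by simp [hy, hp, hget]; omega)]
        rw [hrec]
        simp [pvColA, hy, hp]
      · rw [List.filter_cons_of_pos (by simp [hget, hp])]
        simp only [List.map_cons]
        rw [hrec]
        simp [pvColA, hp]
    · rw [List.filter_cons_of_pos (by simp [hy])]
      simp only [List.map_cons]
      rw [hrec]
      simp [pvColA, hy]

theorem pvCollapsed_eq (token_ids : List Int) (mask_id : Int) :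
    rmCollapsed token_ids mask_id = pvCol mask_id token_ids := by
  cases token_ids with
  | nil => simp [rmCollapsed, pvCol, PySem.List.enumerate_nil]
  | cons x rest =>
    unfold rmCollapsed
    rw [PySem.List.enumerate_cons]
    rw [List.filter_cons_of_pos (by simp)]
    simp only [List.map_cons, pvCol]
    rw [show (0 : Int) + 1 = ((1 : Nat) : Int) by norm_num]
    rw [pvColA_enum mask_id (x :: rest) rest 1 x (by omega) (by simp) (by simp)]

theorem pvColA_of_mask (mask_id : Int) (ys : List Int) :
    pvColA mask_id mask_id ys = pvCol mask_id (ys.dropWhile (fun t => t = mask_id)) := by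
  induction ys with
  | nil => simp [pvColA, pvCol, List.dropWhile]
  | cons y r ih =>
    by_cases hy : y = mask_id
    · subst hy
      simp only [pvColA, List.dropWhile]
      simpa using ih
    · simp [pvColA, hy, List.dropWhile, pvCol]

theorem pvColA_of_other (mask_id prev : Int) (hprev : ¬ prev = mask_id) (ys : List Int) :
    pvColA mask_id prev ys = pvCol mask_id ys := by
  cases ys with
  | nil => simp [pvColA, pvCol]
  | cons y r =>
    simp only [pvColA, pvCol, if_neg (fun h : y = mask_id ∧ prev = mask_id => hprev h.2)]

def pvBStep (mask_id : Int) : List Int × Int → Int → List Int × Int :=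
  fun st t => if t = mask_id then (st.1 ++ [st.2], st.2 + 1) else (st.1 ++ [t], st.2)

theorem pvStage2 (mask_id : Int) :
    ∀ (n : Nat) (xs : List Int), xs.length ≤ n → ∀ (acc : List Int) (c : Int),
      ((pvCol mask_id xs).foldl (pvBStep mask_id) (acc, c)).1 = acc ++ pvGroups mask_id xs c := by
  intro n
  induction n with
  | zero =>
    intro xs h acc c
    have : xs = [] := List.eq_nil_of_length_eq_zero (Nat.le_zero.mp h)
    subst this
    simp [pvCol, pvGroups]
  | succ n ih =>
    intro xs h acc c
    match xs with
    | [] => simp [pvCol, pvGroups]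
    | x :: rest =>
      by_cases hx : x = mask_id
      · simp only [pvCol, List.foldl_cons, pvBStep, hx, if_true]
        rw [pvColA_of_mask, pvGroups_mask_cons]
        rw [ih (rest.dropWhile (fun t => t = mask_id))
              (le_trans (List.length_dropWhile_le _ _) (by simpa using h))
              (acc ++ [c]) (c + 1)]
        simp
      · simp only [pvCol, List.foldl_cons, pvBStep, if_neg hx]
        rw [pvColA_of_other mask_id x hx, pvGroups_other_cons _ _ _ _ hx]
        rw [ih rest (by simpa using h) (acc ++ [x]) c]
        simp

theorem pvB_eq (token_ids : List Int) (mask_id : Int) :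
    replace_masks_alt token_ids mask_id = pvGroups mask_id token_ids 0 := by
  unfold replace_masks_alt
  rw [pvCollapsed_eq]
  simpa using pvStage2 mask_id token_ids.length token_ids le_rfl [] 0

-- ===== VERDICT (by name: the statement is the Claim_ definition above) =====
theorem replace_masks_spec : Claim_equal_replace_masks := by
  intro token_ids mask_id _
  show replace_masks token_ids mask_id = replace_masks_alt token_ids mask_id
  rw [pvA_eq, pvLoop_inv token_ids mask_id [] [] 0, pvB_eq]
  simp
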